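-- pv_equiv track=rewrite | github.com/NotSquiz/ATLAS | atlas/voice/number_parser.py | parse_categorical
-- ===== SOURCE A (Python) =====
-- from typing import Optional, Tuple
--
-- def parse_categorical(text: str, options: list[str]) -> Optional[str]:
--     """
--     Parse categorical responses.
--
--     Args:
--         text: The spoken input
--         options: List of valid options
--
--     Returns:
--         Matching option or None
--     """
--     text = text.lower().strip()
--
--     # Direct match
--     for option in options:
--         if option.lower() == text:
--             return option
--
--     # Partial match
--     for option in options:
--         if option.lower() in text or text in option.lower():
--             return option
--
--     return None
-- ===== SOURCE B (Python) =====
-- def parse_categorical(text, options):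
--     """Single pass: return an exact match immediately; remember the first
--     partial match and return it only after the whole list has been scanned."""
--     text = text.lower().strip()
--     first_partial = None
--     for option in options:
--         lo = option.lower()
--         if lo == text:
--             return option
--         if first_partial is None and (lo in text or text in lo):
--             first_partial = option
--     return first_partial
-- ===== Notes on version B (the rewrite author's own statement) =====
-- stated objective: alternative
-- what changed: Replaces A's two sequential scans (exact pass, then partial pass) by one single pass that returns an exact match immediately and carries the first partial match in an accumulator returned after the loop.
import Mathlib
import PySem

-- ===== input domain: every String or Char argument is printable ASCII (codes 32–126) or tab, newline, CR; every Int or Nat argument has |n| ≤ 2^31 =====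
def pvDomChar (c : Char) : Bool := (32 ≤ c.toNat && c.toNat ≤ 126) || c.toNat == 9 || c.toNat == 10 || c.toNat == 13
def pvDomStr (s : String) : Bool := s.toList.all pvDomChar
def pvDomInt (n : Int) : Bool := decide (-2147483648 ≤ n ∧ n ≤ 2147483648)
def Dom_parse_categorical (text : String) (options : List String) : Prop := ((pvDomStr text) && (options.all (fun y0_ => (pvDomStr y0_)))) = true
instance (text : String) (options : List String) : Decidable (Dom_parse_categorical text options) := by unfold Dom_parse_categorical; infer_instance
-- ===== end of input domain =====

-- B collapses A's two sequential scans into one pass with a remembered first-partial accumulator (alternative decomposition; return value identical).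


-- ===== PORT A =====
-- first loop of A: direct match
def paExact (t : String) : List String → Option String
  | [] => none
  | o :: rest => if PySem.Str.lower o == t then some o else paExact t rest

-- second loop of A: partial match
def paPartial (t : String) : List String → Option String
  | [] => none
  | o :: rest =>
      if PySem.Str.isIn (PySem.Str.lower o) t || PySem.Str.isIn t (PySem.Str.lower o)
      then some o else paPartial t rest

def parse_categorical (text : String) (options : List String) : Option String :=
  let t := PySem.Str.strip (PySem.Str.lower text)
  match paExact t options with
  | some o => some o
  | none => paPartial t options

-- ===== PORT B =====
-- B's single loop: exact match returns at once; first partial is remembered and returned after the loop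
def pbLoop (t : String) (firstPartial : Option String) : List String → Option String
  | [] => firstPartial
  | o :: rest =>
      let lo := PySem.Str.lower o
      if lo == t then some o
      else if firstPartial.isNone && (PySem.Str.isIn lo t || PySem.Str.isIn t lo)
      then pbLoop t (some o) rest
      else pbLoop t firstPartial rest

def parse_categorical_alt (text : String) (options : List String) : Option String :=
  pbLoop (PySem.Str.strip (PySem.Str.lower text)) none options

-- ===== PRECONDITION & SPEC =====
def Spec_parse_categorical (text : String) (options : List String) (out : Option String) : Prop := out = parse_categorical_alt text options
instance (text : String) (options : List String) (out : Option String) : Decidable (Spec_parse_categorical text options out) := by unfold Spec_parse_categorical; infer_instance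

-- ===== CLAIM (what is proved, stated in full; the proofs are below) =====
def Claim_equal_parse_categorical : Prop := ∀ (text : String) (options : List String), Dom_parse_categorical text options → Spec_parse_categorical text options (parse_categorical text options)

-- ===== LEMMAS AND PROOFS =====
-- loop invariant of B: the carried firstPartial wins only when no exact match remains,
-- and a partial found earlier beats any found later
theorem pbLoop_eq (t : String) (opts : List String) : ∀ (fp : Option String),
    pbLoop t fp opts =
      match paExact t opts with
      | some o => some o
      | none => match fp with
        | some p => some p
        | none => paPartial t opts := by
  induction opts with
  | nil => intro fp; cases fp <;> simp [pbLoop, paExact, paPartial]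
  | cons o rest ih =>
      intro fp
      simp only [pbLoop, paExact, paPartial]
      by_cases hx : (PySem.Str.lower o == t) = true
      · simp [hx]
      · simp only [hx, if_neg, Bool.false_eq_true, not_false_iff]
        cases fp with
        | some p => simp [ih]
        | none =>
            simp only [Option.isNone_none, Bool.true_and]
            split_ifs with hp
            · rw [ih]
            · exact ih none

-- ===== VERDICT (by name: the statement is the Claim_ definition above) =====
theorem parse_categorical_spec : Claim_equal_parse_categorical := by
  intro text options _
  unfold Spec_parse_categorical parse_categorical parse_categorical_alt
  rw [pbLoop_eq]
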